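-- pv_equiv track=rewrite | github.com/SSung023/Coding-test | Programmers/python/더 맵게.py | solution
-- ===== SOURCE A (Python) =====
-- import heapq
--
-- def solution(scoville, K):
--     answer = 0
--     heapq.heapify(scoville)
--
--     if scoville[0] >= K:
--         return 0
--
--     while len(scoville) >= 2:
--         first = heapq.heappop(scoville)
--         second = heapq.heappop(scoville)
--         new = first + (second * 2)
--
--         heapq.heappush(scoville, new)
--         answer += 1
--
--         # heap 구조를 가지고 있으므로, 제일 앞의 값이 제일 작은 값
--         if scoville[0] >= K:
--             return answer
--
--     if scoville[0] >= K:
--             return answer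
--     return -1
-- ===== SOURCE B (Python) =====
-- def solution(scoville, K):
--     # Sorted-list alternative to the heap: sort once, always take the two
--     # front (smallest) elements, and insert the mix back in order.
--     # (Does not mutate the argument, unlike A which heapifies it in place.)
--     s = sorted(scoville)
--     if s[0] >= K:
--         return 0
--     answer = 0
--     while len(s) >= 2:
--         new = s[0] + s[1] * 2
--         s = s[2:]
--         i = 0
--         while i < len(s) and s[i] < new:
--             i += 1
--         s.insert(i, new)
--         answer += 1
--         if s[0] >= K:
--             return answer
--     return -1
-- ===== Notes on version B (the rewrite author's own statement) =====
-- stated objective: alternative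
-- what changed: Replaces the binary heap with a list kept sorted: sort once, repeatedly take the two front (smallest) elements and re-insert the mix by ordered insertion; B also does not mutate its argument. Pre_ excludes only the empty list, on which both programs raise IndexError.
import Mathlib
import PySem

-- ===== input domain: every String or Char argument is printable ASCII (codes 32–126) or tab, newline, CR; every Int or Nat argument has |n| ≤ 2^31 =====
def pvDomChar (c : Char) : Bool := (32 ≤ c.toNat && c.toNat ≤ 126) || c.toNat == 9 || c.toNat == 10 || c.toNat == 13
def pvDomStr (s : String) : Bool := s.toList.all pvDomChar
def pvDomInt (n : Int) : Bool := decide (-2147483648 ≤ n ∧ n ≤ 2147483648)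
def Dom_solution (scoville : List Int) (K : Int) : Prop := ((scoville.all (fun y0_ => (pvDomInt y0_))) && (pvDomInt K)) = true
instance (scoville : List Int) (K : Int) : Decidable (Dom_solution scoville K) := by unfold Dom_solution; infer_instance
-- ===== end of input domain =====

-- B keeps a sorted list instead of A's heap (alternative data structure, not claimed faster).
-- Python A mutates `scoville` in place (heapify/pops), B does not: the equivalence proved is about the return value only.

-- ===== PORT A =====
-- heapq is a stdlib call; it is modelled observationally: A observes only the heap's
-- length, its root scoville[0] (= the minimum) and the popped values, so heapify is the
-- identity on the bag, heappop yields the minimum value and removes its first occurrence,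
-- and heappush conses.  This is exact for every value A's code reads from the heap.
def heapPeek (h : List Int) : Option Int := PySem.List.min? h (fun x => x)

def solutionLoop (h : List Int) (K answer : Int) : Int :=
  if _hlen : 2 ≤ h.length then
    match hm : PySem.List.min? h (fun x => x) with
    | none => -1  -- unreachable: h.length ≥ 2
    | some first =>
      match hm1 : PySem.List.min? (h.erase first) (fun x => x) with
      | none => -1  -- unreachable: the popped heap is nonempty
      | some second =>
        -- new = first + second * 2, pushed onto the popped heap
        if (heapPeek ((first + second * 2) :: (h.erase first).erase second)).getD 0 ≥ K then
          answer + 1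
        else solutionLoop ((first + second * 2) :: (h.erase first).erase second) K (answer + 1)
  else if (heapPeek h).getD 0 ≥ K then answer else -1
termination_by h.length
decreasing_by
  have hmem : first ∈ h := PySem.List.min?_mem hm
  have hmem1 : second ∈ h.erase first := PySem.List.min?_mem hm1
  have e1 : (h.erase first).length = h.length - 1 := List.length_erase_of_mem hmem
  have e2 : ((h.erase first).erase second).length = (h.erase first).length - 1 :=
    List.length_erase_of_mem hmem1
  simp only [List.length_cons, e2, e1]
  omega

def solution (scoville : List Int) (K : Int) : Int :=
  if (heapPeek scoville).getD 0 ≥ K then 0 else solutionLoop scoville K 0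

-- ===== PORT B =====
-- Source B's hand-written ordered insertion (scan to the first element ≥ new, insert there)
-- is Mathlib's List.orderedInsert (· ≤ ·).
def solutionAltLoop (s : List Int) (K answer : Int) : Int :=
  match s with
  | a :: b :: rest =>
    if (List.orderedInsert (· ≤ ·) (a + b * 2) rest).headD 0 ≥ K then answer + 1
    else solutionAltLoop (List.orderedInsert (· ≤ ·) (a + b * 2) rest) K (answer + 1)
  | _ => -1
termination_by s.length
decreasing_by
  simp only [List.orderedInsert_length, List.length_cons]
  omega

def solution_alt (scoville : List Int) (K : Int) : Int :=
  let s := PySem.List.sorted scoville (fun x => x) false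
  if s.headD 0 ≥ K then 0 else solutionAltLoop s K 0

-- ===== PRECONDITION & SPEC =====
-- Python A raises IndexError at `scoville[0]` on the empty list (and B raises there too).
def Pre_solution (scoville : List Int) (K : Int) : Prop := scoville ≠ []
instance (scoville : List Int) (K : Int) : Decidable (Pre_solution scoville K) := by
  unfold Pre_solution; infer_instance
def pvWitness_solution : List Int × Int := ([1, 2, 3, 9, 10, 12], 7)

def Spec_solution (scoville : List Int) (K : Int) (out : Int) : Prop := out = solution_alt scoville K
instance (scoville : List Int) (K : Int) (out : Int) : Decidable (Spec_solution scoville K out) := by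
  unfold Spec_solution; infer_instance

-- ===== CLAIM (what is proved, stated in full; the proofs are below) =====
def Claim_equal_solution : Prop := ∀ (scoville : List Int) (K : Int), Dom_solution scoville K → Pre_solution scoville K → Spec_solution scoville K (solution scoville K)

-- ===== LEMMAS AND PROOFS =====

-- The minimum of any permutation of a sorted list a :: t is a.
theorem pv_min_of_perm_sorted {h t : List Int} {a : Int}
    (hp : h.Perm (a :: t)) (hs : (a :: t).Pairwise (· ≤ ·)) :
    PySem.List.min? h (fun x => x) = some a := by
  cases hmin : PySem.List.min? h (fun x => x) with
  | none =>
    have : h = [] := (PySem.List.min?_eq_none_iff h (fun x => x)).mp hmin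
    subst this
    exact absurd hp.symm (by simp)
  | some m =>
    have hmem : m ∈ h := PySem.List.min?_mem hmin
    have hmin' : ∀ y ∈ h, m ≤ y := PySem.List.min?_isMin hmin
    have hma : m ≤ a := hmin' a (hp.symm.mem_iff.mp (by simp))
    have ham : a ≤ m := by
      have := hp.mem_iff.mp hmem
      rcases List.mem_cons.mp this with h1 | h1
      · omega
      · exact (List.pairwise_cons.mp hs).1 m h1
    rw [le_antisymm hma ham]

theorem pv_loop_eq (n : ℕ) :
    ∀ (h s : List Int) (K answer : Int), h.length ≤ n → h.Perm s →
      s.Pairwise (· ≤ ·) → s ≠ [] → s.headD 0 < K →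
      solutionLoop h K answer = solutionAltLoop s K answer := by
  induction n with
  | zero =>
    intro h s K answer hn hp _ hne _
    have : s = [] := by
      have := hp.length_eq; cases s <;> simp_all
    exact absurd this hne
  | succ n ih =>
    intro h s K answer hn hp hs hne hhead
    match s with
    | [] => exact absurd rfl hne
    | [a] =>
      have hh : h = [a] := List.perm_singleton.mp hp
      subst hh
      have hm : PySem.List.min? [a] (fun x => x) = some a :=
        pv_min_of_perm_sorted (List.Perm.refl _) hs
      have hK : ¬ (a ≥ K) := by simpa using hhead
      rw [solutionLoop, solutionAltLoop]
      rw [dif_neg (by simp)]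
      · simp only [heapPeek, hm, Option.getD_some, if_neg hK]
      · intro x y r hxy
        simp at hxy
    | a :: b :: rest =>
      have hlen2 : 2 ≤ h.length := by rw [hp.length_eq]; simp
      have hfirst : PySem.List.min? h (fun x => x) = some a :=
        pv_min_of_perm_sorted hp hs
      have hp1 : (h.erase a).Perm (b :: rest) := by
        have := hp.erase a
        rwa [List.erase_cons_head] at this
      have hs1 : (b :: rest).Pairwise (· ≤ ·) := (List.pairwise_cons.mp hs).2
      have hsecond : PySem.List.min? (h.erase a) (fun x => x) = some b :=
        pv_min_of_perm_sorted hp1 hs1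
      have hp2 : ((h.erase a).erase b).Perm rest := by
        have := hp1.erase b
        rwa [List.erase_cons_head] at this
      have hsrest : rest.Pairwise (· ≤ ·) := (List.pairwise_cons.mp hs1).2
      have hs' : (List.orderedInsert (· ≤ ·) (a + b * 2) rest).Pairwise (· ≤ ·) :=
        List.Pairwise.orderedInsert (a + b * 2) rest hsrest
      have hp' : ((a + b * 2) :: (h.erase a).erase b).Perm
          (List.orderedInsert (· ≤ ·) (a + b * 2) rest) :=
        ((hp2.cons (a + b * 2)).trans (List.perm_orderedInsert _ (a + b * 2) rest).symm)
      have hne' : List.orderedInsert (· ≤ ·) (a + b * 2) rest ≠ [] := by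
        intro hc
        have := (List.perm_orderedInsert (fun x1 x2 => x1 ≤ x2) (a + b * 2) rest).symm.length_eq
        rw [hc] at this; simp at this
      match hse : List.orderedInsert (· ≤ ·) (a + b * 2) rest with
      | [] => exact absurd hse hne'
      | c :: t =>
        rw [hse] at hs' hp'
        have hpeek : PySem.List.min? ((a + b * 2) :: (h.erase a).erase b) (fun x => x) = some c :=
          pv_min_of_perm_sorted hp' hs'
        rw [solutionLoop, dif_pos hlen2]
        split
        next heq => rw [hfirst] at heq; cases heq
        next first heq =>
          rw [hfirst] at heq; injection heq with heq; subst heq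
          split
          next heq1 => rw [hsecond] at heq1; cases heq1
          next second heq1 =>
            rw [hsecond] at heq1; injection heq1 with heq1; subst heq1
            rw [solutionAltLoop, hse]
            simp only [heapPeek, hpeek, Option.getD_some, List.headD_cons]
            by_cases hc : c ≥ K
            · simp [hc, ge_iff_le]
            · rw [if_neg hc, if_neg hc]
              apply ih
              · have e1 : (h.erase a).length = h.length - 1 :=
                  List.length_erase_of_mem (PySem.List.min?_mem hfirst)
                have e2 : ((h.erase a).erase b).length = (h.erase a).length - 1 :=
                  List.length_erase_of_mem (PySem.List.min?_mem hsecond)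
                simp only [List.length_cons, e2, e1]
                omega
              · exact hp'
              · exact hs'
              · simp
              · simpa using not_le.mp hc

-- ===== VERDICT (by name: the statement is the Claim_ definition above) =====
theorem solution_spec : Claim_equal_solution := by
  intro scoville K _hdom hpre
  unfold Spec_solution solution solution_alt
  have hperm : scoville.Perm (PySem.List.sorted scoville (fun x => x) false) :=
    (PySem.List.sorted_perm scoville (fun x => x) false).symm
  have hpair : (PySem.List.sorted scoville (fun x => x) false).Pairwise (· ≤ ·) :=
    PySem.List.sorted_pairwise scoville (fun x => x)
  have hne : PySem.List.sorted scoville (fun x => x) false ≠ [] := by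
    intro hc
    exact hpre ((PySem.List.sorted_eq_nil_iff scoville (fun x => x) false).mp hc)
  match hse : PySem.List.sorted scoville (fun x => x) false with
  | [] => exact absurd hse hne
  | c :: t =>
    rw [hse] at hperm hpair
    have hpeek : PySem.List.min? scoville (fun x => x) = some c :=
      pv_min_of_perm_sorted hperm hpair
    simp only [heapPeek, hpeek, Option.getD_some, List.headD_cons]
    by_cases hc : c ≥ K
    · simp [hc]
    · simp only [if_neg hc]
      exact pv_loop_eq scoville.length scoville (c :: t) K 0 le_rfl hperm hpair
        (by simp) (by simpa using not_le.mp hc)
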